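-- pv_equiv track=rewrite | github.com/reiniscirpons/freebandlib | freebandlib/words.py | pref_ltof
-- ===== SOURCE A (Python) =====
-- from typing import List, Optional, Tuple, Set, Callable
--
-- OutputLetter = int
--
-- OutputWord = List[OutputLetter]
--
-- def _validate_output_word(word: OutputWord) -> None:
--     if not isinstance(word, list):
--         raise TypeError("the argument must be a list")
--     if not all(lambda x: isinstance(x, int) for x in word):
--         raise TypeError("the argument must be a list of integers")
--
-- def cont(word: OutputWord) -> Set[OutputLetter]:
--     """Return the content of a word.
--
--     Parameters
--     ----------
--     word: OutputWord
--         A word over the output alphabet.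
--
--     Returns
--     -------
--     Set[OutputLetter]
--         The set of letters occuring in `word`.
--     """
--     return set(word)
--
-- def pref_ltof(
--     word: OutputWord,
-- ) -> Tuple[Optional[OutputWord], Optional[OutputLetter]]:
--     """Return the prefix and first to occur last letter of a word.
--
--     Either both returned values are `None` or neither is `None`.
--
--     Parameters
--     ----------
--     word: OutputWord
--         A word over the output alphabet.
--
--     Returns
--     -------
--     Optional[OutputWord]
--         The largest prefix of `word` containing one less letter in its content
--         than `word`, or `None` if no such prefix exists.
--     Optional[OutputLetter]
--         The letter after the prefix defined above, or `None` if no such prefix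
--         exists.
--     """
--     _validate_output_word(word)
--
--     k = len(cont(word))
--     j = 0
--     seen = set()
--     for i, letter in enumerate(word):
--         if letter not in seen:
--             j += 1
--             if j == k:
--                 return word[:i], letter
--             seen.add(letter)
--     # Only happens if word is the empty word
--     return None, None
-- ===== SOURCE B (Python) =====
-- def pref_ltof(word):
--     # Backward scan: the answer's cut point is the largest index i whose
--     # letter does not occur earlier in the word (the last "new" letter).
--     for i in range(len(word) - 1, -1, -1):
--         if word[i] not in word[:i]:
--             return word[:i], word[i]
--     return None, None
-- ===== Notes on version B (the rewrite author's own statement) =====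
-- stated objective: simpler
-- what changed: Replaced A's forward scan with a seen-set, a distinct-letter counter and a precomputed content size by a plain backward scan that returns at the largest index whose letter does not occur earlier in the word; no sets or counters at all.
import Mathlib
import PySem

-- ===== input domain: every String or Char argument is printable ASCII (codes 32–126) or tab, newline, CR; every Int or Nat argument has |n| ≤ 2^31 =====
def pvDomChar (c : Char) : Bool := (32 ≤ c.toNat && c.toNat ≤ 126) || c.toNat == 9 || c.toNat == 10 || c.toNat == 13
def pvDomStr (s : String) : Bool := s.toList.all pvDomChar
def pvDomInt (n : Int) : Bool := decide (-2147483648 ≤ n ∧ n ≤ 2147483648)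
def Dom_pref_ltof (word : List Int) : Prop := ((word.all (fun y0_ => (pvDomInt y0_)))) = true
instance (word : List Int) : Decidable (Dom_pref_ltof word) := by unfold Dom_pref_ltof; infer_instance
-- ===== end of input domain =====

-- B replaces A's seen-set/counter forward scan by a plain backward scan for the last
-- first-occurrence index: simpler (no sets, no counters); not claimed faster.


-- ===== PORT A =====
-- _validate_output_word never raises on a list of ints, so it is a no-op here.
-- Loop body: `if letter not in seen: j += 1; if j == k: return word[:i], letter; seen.add(letter)`
def prefGo (word : List Int) (k : Nat) :
    List (Int × Int) → Nat → PySem.Set Int → Option (List Int) × Option Int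
  | [], _, _ => (none, none)
  | (i, letter) :: rest, j, seen =>
    if PySem.Set.contains seen letter then prefGo word k rest j seen
    else if j + 1 = k then (some (PySem.List.slice word none (some i)), some letter)
    else prefGo word k rest (j + 1) (PySem.Set.add seen letter)

def pref_ltof (word : List Int) : Option (List Int) × Option Int :=
  let k := (PySem.Set.ofList word).length      -- k = len(cont(word)) = len(set(word))
  prefGo word k (PySem.List.enumerate word 0) 0 PySem.Set.empty

-- ===== PORT B =====
-- `for i in range(len(word)-1, -1, -1): if word[i] not in word[:i]: return word[:i], word[i]`
-- (i is always a valid nonnegative index, so word[i] is getD i 0 and word[:i] is take i — exact here)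
def altGo (word : List Int) : Nat → Option (List Int) × Option Int
  | 0 => (none, none)
  | i + 1 =>
    if word.getD i 0 ∈ word.take i then altGo word i
    else (some (word.take i), some (word.getD i 0))

def pref_ltof_alt (word : List Int) : Option (List Int) × Option Int :=
  altGo word word.length

-- ===== PRECONDITION & SPEC =====
def Spec_pref_ltof (word : List Int) (out : Option (List Int) × Option Int) : Prop := out = pref_ltof_alt word
instance (word : List Int) (out : Option (List Int) × Option Int) : Decidable (Spec_pref_ltof word out) := by unfold Spec_pref_ltof; infer_instance

-- ===== CLAIM (what is proved, stated in full; the proofs are below) =====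
def Claim_equal_pref_ltof : Prop := ∀ (word : List Int), Dom_pref_ltof word → Spec_pref_ltof word (pref_ltof word)

-- ===== LEMMAS AND PROOFS =====

theorem len_le_update (u : List Int) (s : PySem.Set Int) :
    s.length ≤ (PySem.Set.update s u).length := by
  induction u generalizing s with
  | nil => simp [PySem.Set.update_nil]
  | cons x u ih =>
    rw [PySem.Set.update_cons]
    refine le_trans ?_ (ih (PySem.Set.add s x))
    rw [PySem.Set.add_eq_ite]
    split_ifs <;> simp

theorem len_ofList_mono (p u : List Int) :
    (PySem.Set.ofList p).length ≤ (PySem.Set.ofList (p ++ u)).length := by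
  rw [PySem.Set.ofList_append]; exact len_le_update u _

theorem ofList_snoc_mem (p : List Int) (x : Int) (h : x ∈ p) :
    PySem.Set.ofList (p ++ [x]) = PySem.Set.ofList p := by
  rw [PySem.Set.ofList_append_singleton,
      PySem.Set.add_of_mem (by simpa [PySem.Set.mem_ofList] using h)]

theorem ofList_snoc_fresh (p : List Int) (x : Int) (h : x ∉ p) :
    PySem.Set.ofList (p ++ [x]) = PySem.Set.ofList p ++ [x] := by
  rw [PySem.Set.ofList_append_singleton,
      PySem.Set.add_of_not_mem (by simpa [PySem.Set.mem_ofList] using h)]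

theorem enumerate_append (xs ys : List Int) (s : Int) :
    PySem.List.enumerate (xs ++ ys) s
      = PySem.List.enumerate xs s ++ PySem.List.enumerate ys (s + xs.length) := by
  induction xs generalizing s with
  | nil => simp [PySem.List.enumerate_nil]
  | cons x xs ih =>
    simp [PySem.List.enumerate_cons, ih (s + 1)]
    ring_nf

theorem enumerate_fst_bounds (w : List Int) (i l : Int)
    (h : (i, l) ∈ PySem.List.enumerate w 0) : 0 ≤ i ∧ i < w.length := by
  have hm : i ∈ (PySem.List.enumerate w 0).map (·.1) := List.mem_map.mpr ⟨(i, l), h, rfl⟩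
  rw [PySem.List.map_fst_enumerate] at hm
  have := PySem.List.mem_pyRange_one.mp hm
  omega

-- prefGo only looks at `word` through slices at indices occurring in its worklist
theorem prefGo_word_congr (w1 w2 : List Int) (k : Nat) (u : List (Int × Int))
    (hw : ∀ il ∈ u, PySem.List.slice w1 none (some il.1) = PySem.List.slice w2 none (some il.1)) :
    ∀ (j : Nat) (seen : PySem.Set Int), prefGo w1 k u j seen = prefGo w2 k u j seen := by
  induction u with
  | nil => intro j seen; rfl
  | cons il u ih =>
    intro j seen
    obtain ⟨i, l⟩ := il
    have h1 := hw (i, l) (List.mem_cons_self ..)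
    have h2 : ∀ il ∈ u, PySem.List.slice w1 none (some il.1) = PySem.List.slice w2 none (some il.1) :=
      fun il h => hw il (List.mem_cons_of_mem _ h)
    simp only [prefGo]
    split_ifs <;> simp_all [ih h2]

-- while the distinct count of the processed prefix stays below k, prefGo consumes its
-- worklist and just updates (j, seen)
theorem prefGo_pass (word : List Int) (k : Nat) (u : List Int) :
    ∀ (p : List Int) (rest : List (Int × Int)),
      (PySem.Set.ofList (p ++ u)).length < k →
      prefGo word k (PySem.List.enumerate u (p.length : Int) ++ rest)
        (PySem.Set.ofList p).length (PySem.Set.ofList p)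
      = prefGo word k rest (PySem.Set.ofList (p ++ u)).length (PySem.Set.ofList (p ++ u)) := by
  induction u with
  | nil => intro p rest _; simp [PySem.List.enumerate_nil]
  | cons x u ih =>
    intro p rest hk
    have hassoc : p ++ x :: u = (p ++ [x]) ++ u := by simp
    rw [hassoc] at hk ⊢
    rw [PySem.List.enumerate_cons]
    simp only [List.cons_append, prefGo]
    have hlen : ((p ++ [x]).length : Int) = (p.length : Int) + 1 := by
      simp [List.length_append]
    by_cases hx : x ∈ p
    · rw [if_pos (by simp [PySem.Set.mem_ofList, hx])]
      have hset := ofList_snoc_mem p x hx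
      have := ih (p ++ [x]) rest hk
      rw [hset, hlen] at this
      exact this
    · rw [if_neg (by simp [PySem.Set.mem_ofList, hx])]
      have hset := ofList_snoc_fresh p x hx
      have hlt : (PySem.Set.ofList (p ++ [x])).length < k :=
        lt_of_le_of_lt (len_ofList_mono (p ++ [x]) u) hk
      have hlen1 : (PySem.Set.ofList (p ++ [x])).length = (PySem.Set.ofList p).length + 1 := by
        rw [hset]; simp
    -- the fresh letter cannot hit k while the count stays below k
      rw [if_neg (by omega)]
      have hadd : PySem.Set.add (PySem.Set.ofList p) x = PySem.Set.ofList (p ++ [x]) := by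
        rw [hset, PySem.Set.add_of_not_mem (by simpa [PySem.Set.mem_ofList] using hx)]
      have := ih (p ++ [x]) rest hk
      rw [hlen, hlen1] at this
      rw [hadd]
      exact this

-- once the distinct count of the whole worklist reaches k, prefGo returns within it,
-- so anything appended after is irrelevant
theorem prefGo_early (word : List Int) (k : Nat) (u : List Int) :
    ∀ (p : List Int) (rest : List (Int × Int)),
      (PySem.Set.ofList p).length < k → k ≤ (PySem.Set.ofList (p ++ u)).length →
      prefGo word k (PySem.List.enumerate u (p.length : Int) ++ rest)
        (PySem.Set.ofList p).length (PySem.Set.ofList p)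
      = prefGo word k (PySem.List.enumerate u (p.length : Int))
        (PySem.Set.ofList p).length (PySem.Set.ofList p) := by
  induction u with
  | nil => intro p rest h1 h2; simp at h2; omega
  | cons x u ih =>
    intro p rest h1 h2
    have hassoc : p ++ x :: u = (p ++ [x]) ++ u := by simp
    rw [hassoc] at h2
    rw [PySem.List.enumerate_cons]
    simp only [List.cons_append, prefGo]
    have hlen : ((p ++ [x]).length : Int) = (p.length : Int) + 1 := by
      simp [List.length_append]
    by_cases hx : x ∈ p
    · have hc : PySem.Set.contains (PySem.Set.ofList p) x = true := by
        simp [PySem.Set.mem_ofList, hx]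
      simp only [hc, if_true]
      have hset := ofList_snoc_mem p x hx
      have := ih (p ++ [x]) rest (by rw [hset]; exact h1) h2
      rw [hset, hlen] at this
      exact this
    · have hc : PySem.Set.contains (PySem.Set.ofList p) x = false := by
        simp [PySem.Set.mem_ofList, hx]
      simp only [hc, Bool.false_eq_true, if_false]
      have hset := ofList_snoc_fresh p x hx
      have hlen1 : (PySem.Set.ofList (p ++ [x])).length = (PySem.Set.ofList p).length + 1 := by
        rw [hset]; simp
      by_cases hk : (PySem.Set.ofList p).length + 1 = k
      · simp only [hk, if_true]
      · simp only [hk, if_false]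
        have hadd : PySem.Set.add (PySem.Set.ofList p) x = PySem.Set.ofList (p ++ [x]) := by
          rw [hset, PySem.Set.add_of_not_mem (by simpa [PySem.Set.mem_ofList] using hx)]
        have := ih (p ++ [x]) rest (by omega) h2
        rw [hlen, hlen1] at this
        rw [hadd]
        exact this

-- A's snoc recurrence
theorem pref_ltof_snoc (w : List Int) (a : Int) :
    pref_ltof (w ++ [a]) = if a ∈ w then pref_ltof w else (some w, some a) := by
  have henum : PySem.List.enumerate (w ++ [a]) 0
      = PySem.List.enumerate w 0 ++ [((w.length : Int), a)] := by
    rw [enumerate_append]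
    simp [PySem.List.enumerate_cons, PySem.List.enumerate_nil]
  by_cases ha : a ∈ w
  · -- k is unchanged; the loop returns inside w and never sees the appended letter
    have hk : (PySem.Set.ofList (w ++ [a])).length = (PySem.Set.ofList w).length := by
      rw [ofList_snoc_mem w a ha]
    have hpos : 0 < (PySem.Set.ofList w).length :=
      List.length_pos_of_mem (by simpa [PySem.Set.mem_ofList] using ha)
    rw [if_pos ha]
    show prefGo (w ++ [a]) (PySem.Set.ofList (w ++ [a])).length
        (PySem.List.enumerate (w ++ [a]) 0) 0 PySem.Set.empty = _
    rw [hk, henum]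
    have e1 : prefGo (w ++ [a]) (PySem.Set.ofList w).length
        (PySem.List.enumerate w 0 ++ [((w.length : Int), a)]) 0 PySem.Set.empty
        = prefGo (w ++ [a]) (PySem.Set.ofList w).length
            (PySem.List.enumerate w 0) 0 PySem.Set.empty :=
      prefGo_early (w ++ [a]) (PySem.Set.ofList w).length w []
        [((w.length : Int), a)] hpos (by simp)
    have e2 : prefGo (w ++ [a]) (PySem.Set.ofList w).length
        (PySem.List.enumerate w 0) 0 PySem.Set.empty
        = prefGo w (PySem.Set.ofList w).length
            (PySem.List.enumerate w 0) 0 PySem.Set.empty :=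
      prefGo_word_congr (w ++ [a]) w (PySem.Set.ofList w).length
        (PySem.List.enumerate w 0) (by
          intro il hil
          obtain ⟨h0i, hiw⟩ := enumerate_fst_bounds w il.1 il.2 hil
          rw [PySem.List.slice_to (w ++ [a]) h0i, PySem.List.slice_to w h0i,
            List.take_append_of_le_length (by omega)]) 0 PySem.Set.empty
    exact e1.trans e2
  · -- k grows by one; the loop passes through all of w and returns at the appended letter
    have hk : (PySem.Set.ofList (w ++ [a])).length = (PySem.Set.ofList w).length + 1 := by
      rw [ofList_snoc_fresh w a ha]; simp
    rw [if_neg ha]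
    show prefGo (w ++ [a]) (PySem.Set.ofList (w ++ [a])).length
        (PySem.List.enumerate (w ++ [a]) 0) 0 PySem.Set.empty = _
    rw [hk, henum]
    have e1 : prefGo (w ++ [a]) ((PySem.Set.ofList w).length + 1)
        (PySem.List.enumerate w 0 ++ [((w.length : Int), a)]) 0 PySem.Set.empty
        = prefGo (w ++ [a]) ((PySem.Set.ofList w).length + 1)
            [((w.length : Int), a)] (PySem.Set.ofList w).length (PySem.Set.ofList w) :=
      prefGo_pass (w ++ [a]) ((PySem.Set.ofList w).length + 1) w []
        [((w.length : Int), a)] (by simp)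
    rw [e1]
    simp only [prefGo]
    have hc : PySem.Set.contains (PySem.Set.ofList w) a = false := by
      simp [PySem.Set.mem_ofList, ha]
    simp only [hc, Bool.false_eq_true, if_false]
    rw [if_pos trivial]
    rw [PySem.List.slice_to (w ++ [a]) (by positivity)]
    simp

-- B ignores an appended letter while scanning strictly inside the original word
theorem altGo_prefix (w : List Int) (a : Int) :
    ∀ i, i ≤ w.length → altGo (w ++ [a]) i = altGo w i := by
  intro i
  induction i with
  | zero => intro _; rfl
  | succ i ih =>
    intro hi
    have hlt : i < w.length := by omega
    have htake : (w ++ [a]).take i = w.take i :=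
      List.take_append_of_le_length (by omega)
    have hget : (w ++ [a]).getD i 0 = w.getD i 0 := by
      simp [List.getD_eq_getElem?_getD, List.getElem?_append_left hlt]
    simp only [altGo, htake, hget, ih (by omega)]

-- B's snoc recurrence
theorem pref_ltof_alt_snoc (w : List Int) (a : Int) :
    pref_ltof_alt (w ++ [a]) = if a ∈ w then pref_ltof_alt w else (some w, some a) := by
  show altGo (w ++ [a]) (w ++ [a]).length = _
  have hlen : (w ++ [a]).length = w.length + 1 := by simp
  rw [hlen]
  have htake : (w ++ [a]).take w.length = w := by
    simp
  have hget : (w ++ [a]).getD w.length 0 = a := by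
    simp [List.getD_eq_getElem?_getD]
  simp only [altGo, htake, hget]
  by_cases ha : a ∈ w
  · rw [if_pos ha, if_pos ha, altGo_prefix w a w.length (le_refl _)]
    rfl
  · rw [if_neg ha, if_neg ha]

-- ===== VERDICT (by name: the statement is the Claim_ definition above) =====
theorem pref_ltof_spec : Claim_equal_pref_ltof := by
  intro word h
  clear h
  show pref_ltof word = pref_ltof_alt word
  induction word using List.reverseRecOn with
  | nil => rfl
  | append_singleton w a ih =>
    rw [pref_ltof_snoc, pref_ltof_alt_snoc]
    split_ifs with h
    · exact ih
    · rfl
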